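-- pv_equiv track=rewrite | github.com/mk8-bruh/UCI | Opentrons OT2 protocols/Kinetics/KineticsTestv1.py | nearestWasher
-- ===== SOURCE A (Python) =====
-- from math import inf
--
-- def nearestWasher(cur:int,washers:list[int]): #a function for finding the shortest path for washing the tip
--     w,b=None,-inf if cur>0 else inf
--     for i in range(len(washers)):
--         if cur>0:
--             if b<washers[i]<cur:
--                 w,b=i,washers[i]
--         elif cur<0:
--             if cur<washers[i]<b:
--                 w,b=i,washers[i]
--         else:
--             if abs(washers[i])<b:
--                 w,b=i,washers[i]
--     return w
-- ===== SOURCE B (Python) =====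
-- def nearestWasher(cur, washers):
--     if cur > 0:
--         valid = lambda w: w < cur
--     elif cur < 0:
--         valid = lambda w: w > cur
--     else:
--         valid = lambda w: True
--     cands = sorted((abs(w - cur), i) for i, w in enumerate(washers) if valid(w))
--     return cands[0][1] if cands else None
-- ===== Notes on version B (the rewrite author's own statement) =====
-- stated objective: alternative
-- what changed: Replaces A's single-pass sign-branched best-value trackers (seeded with +/-inf) by a sort-then-pick algorithm: build (abs(w-cur), index) candidate pairs for the valid washers, sort them lexicographically, and return the index of the first sorted pair (None if no candidate); trades O(n) tracking for O(n log n) sorting.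
-- intended difference: When cur==0 and some negative washer is followed by a later washer of strictly smaller absolute value, A can freeze on that negative washer (abs(w) < b compares against the stored signed value, which a negative bound never lets win) and returns its index, while B returns the index of the first washer of minimal absolute value, the intended nearest washer. — e.g. on nearestWasher(0, [-5, 3]): A returns some 0, B returns some 1
import Mathlib
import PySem

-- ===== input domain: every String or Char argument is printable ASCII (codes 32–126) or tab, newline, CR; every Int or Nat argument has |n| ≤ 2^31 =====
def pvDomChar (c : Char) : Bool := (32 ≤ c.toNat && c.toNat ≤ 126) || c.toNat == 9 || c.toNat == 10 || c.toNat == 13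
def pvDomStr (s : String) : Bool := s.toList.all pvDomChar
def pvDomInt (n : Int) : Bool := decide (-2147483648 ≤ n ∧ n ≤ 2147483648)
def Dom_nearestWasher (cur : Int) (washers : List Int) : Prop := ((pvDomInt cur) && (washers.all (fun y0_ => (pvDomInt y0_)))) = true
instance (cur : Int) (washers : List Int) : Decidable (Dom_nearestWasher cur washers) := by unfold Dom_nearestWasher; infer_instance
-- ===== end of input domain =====

-- B replaces A's single-pass sign-branched ±inf-seeded trackers by a sort-then-pick algorithm
-- (build (distance, index) candidates, sort lexicographically, take the first); on the cur==0 corner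
-- where A's abs-vs-signed-value comparison freezes, B returns the intended nearest index (see D_).


-- ===== PORT A =====
-- Python A: w,b = None, (-inf if cur>0 else inf); for i in range(len(washers)): three sign branches; return w.
-- The ±inf sentinel is ported as `none` (w and b are always set together, so b = none exactly while w = None);
-- a comparison against the ±inf sentinel is always true in the direction its branch uses, which is what
-- `Option.elim true` encodes — exact for this program.  `for i in range(len(washers))` reading washers[i]
-- is ported as a fold over `PySem.List.enumerate washers` (the same (i, washers[i]) pairs, in order).
def nearestWasherStepA (cur : Int) (st : Option Int × Option Int) (p : Int × Int) : Option Int × Option Int :=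
  let w := st.1; let b := st.2; let i := p.1; let x := p.2
  if cur > 0 then
    if (b.elim true (fun bv => decide (bv < x))) && decide (x < cur) then (some i, some x) else (w, b)
  else if cur < 0 then
    if decide (cur < x) && (b.elim true (fun bv => decide (x < bv))) then (some i, some x) else (w, b)
  else
    if (b.elim true (fun bv => decide (|x| < bv))) then (some i, some x) else (w, b)

def nearestWasher (cur : Int) (washers : List Int) : Option Int :=
  ((PySem.List.enumerate washers).foldl (nearestWasherStepA cur) (none, none)).1

-- ===== PORT B =====
-- Python B: cands = sorted((abs(w - cur), i) for i, w in enumerate(washers) if valid(w));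
-- return cands[0][1] if cands else None.  Python's sorted on int pairs is the stable lexicographic
-- sort: PySem.List.sorted2 with the two component keys; 'cands[0][1] if cands else None' is a head match.
def nwCandB (cur : Int) (p : Int × Int) : Option (Int × Int) :=
  if (if cur > 0 then decide (p.2 < cur) else if cur < 0 then decide (cur < p.2) else true)
  then some (|p.2 - cur|, p.1) else none

def nearestWasher_alt (cur : Int) (washers : List Int) : Option Int :=
  let cands := (PySem.List.enumerate washers).filterMap (nwCandB cur)
  match PySem.List.sorted2 cands (·.1) (·.2) with
  | m :: _ => some m.2
  | [] => none

-- ===== PRECONDITION & SPEC =====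
-- When cur = 0 and some negative washer is a strict prefix-minimum in absolute value while a later washer has
-- strictly smaller absolute value, A freezes on a negative washer (its condition abs(w) < b stores the signed
-- value in b, and a negative bound can never be beaten) and returns its index, while B returns the index of the
-- first washer of minimal absolute value — the intended nearest washer.
def D_nearestWasher (cur : Int) (washers : List Int) : Prop :=
  cur = 0 ∧ ∃ i < washers.length, washers.getD i 0 < 0 ∧
    (∀ y ∈ washers.take i, |washers.getD i 0| < |y|) ∧
    ∃ y ∈ washers.drop i, |y| < |washers.getD i 0|
instance (cur : Int) (washers : List Int) : Decidable (D_nearestWasher cur washers) := by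
  unfold D_nearestWasher; infer_instance

def Spec_nearestWasher (cur : Int) (washers : List Int) (out : Option Int) : Prop :=
  ¬ D_nearestWasher cur washers → out = nearestWasher_alt cur washers
instance (cur : Int) (washers : List Int) (out : Option Int) : Decidable (Spec_nearestWasher cur washers out) := by
  unfold Spec_nearestWasher; infer_instance

def pvDiffWitness_nearestWasher : Int × List Int := (0, [-5, 3])
def pvDiffWitnessOut_nearestWasher : (Option Int) × (Option Int) := (some 0, some 1)

-- ===== CLAIM (what is proved, stated in full; the proofs are below) =====
def Claim_unchanged_nearestWasher : Prop := ∀ (cur : Int) (washers : List Int), Dom_nearestWasher cur washers → Spec_nearestWasher cur washers (nearestWasher cur washers)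
def Claim_changed_nearestWasher : Prop := Dom_nearestWasher (pvDiffWitness_nearestWasher.1) (pvDiffWitness_nearestWasher.2) ∧ D_nearestWasher (pvDiffWitness_nearestWasher.1) (pvDiffWitness_nearestWasher.2) ∧ nearestWasher (pvDiffWitness_nearestWasher.1) (pvDiffWitness_nearestWasher.2) = pvDiffWitnessOut_nearestWasher.1 ∧ nearestWasher_alt (pvDiffWitness_nearestWasher.1) (pvDiffWitness_nearestWasher.2) = pvDiffWitnessOut_nearestWasher.2 ∧ pvDiffWitnessOut_nearestWasher.1 ≠ pvDiffWitnessOut_nearestWasher.2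

def Claim_exact_nearestWasher : Prop := ∀ (cur : Int) (washers : List Int), Dom_nearestWasher cur washers → D_nearestWasher cur washers → nearestWasher cur washers ≠ nearestWasher_alt cur washers

-- ===== LEMMAS AND PROOFS =====

def nwSelB (acc : Option (Int × Int)) (c : Int × Int) : Option (Int × Int) :=
  match acc with
  | none => some c
  | some m => if (decide (c.1 < m.1) || (!decide (m.1 < c.1) && decide (c.2 < m.2))) then some c else some m

def nwStepB (cur : Int) (acc : Option (Int × Int)) (p : Int × Int) : Option (Int × Int) :=
  match nwCandB cur p with
  | none => acc
  | some c => nwSelB acc c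

-- the head of an insertion step only depends on the previous head
lemma head?_insertBy {α : Type} (before : α → α → Bool) (x : α) (ys : List α) :
    (PySem.List.insertBy before x ys).head? =
      match ys.head? with
      | none => some x
      | some y => if before x y then some x else some y := by
  cases ys with
  | nil => rfl
  | cons y t =>
    simp only [PySem.List.insertBy, List.head?_cons]
    split <;> rfl

-- head of an insertion-sort fold = running lexicographic minimum
lemma head?_foldl_insertBy {α : Type} (lt : α → α → Bool) (l : List α) :
    ∀ (acc : List α),
    (l.foldl (fun a x => PySem.List.insertBy lt x a) acc).head? =
      l.foldl (fun (h : Option α) x => match h with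
        | none => some x
        | some m => if lt x m then some x else some m) acc.head? := by
  induction l with
  | nil => intro acc; rfl
  | cons x t ih =>
    intro acc
    rw [List.foldl_cons, List.foldl_cons, ih, head?_insertBy]

-- the first element of B's sorted candidate list is min2? of the candidates
lemma nwSortedHead (xs : List (Int × Int)) :
    (PySem.List.sorted2 xs (fun c => c.1) (fun c => c.2)).head? =
      PySem.List.min2? xs (fun c => c.1) (fun c => c.2) := by
  unfold PySem.List.sorted2 PySem.List.min2?
  simpa using head?_foldl_insertBy
    (fun a b : Int × Int => decide (a.1 < b.1) || (!decide (b.1 < a.1) && decide (a.2 < b.2))) xs []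

lemma nwMin2Eq (xs : List (Int × Int)) :
    PySem.List.min2? xs (·.1) (·.2) = xs.foldl nwSelB none := by
  unfold PySem.List.min2?
  congr 1
  funext a x
  cases a <;> rfl

lemma nwMinFold (cur : Int) (l : List (Int × Int)) (acc : Option (Int × Int)) :
    (l.filterMap (nwCandB cur)).foldl nwSelB acc = l.foldl (nwStepB cur) acc := by
  induction l generalizing acc with
  | nil => rfl
  | cons x t ih =>
    rw [List.filterMap_cons]
    cases h : nwCandB cur x
    · rw [List.foldl_cons, show nwStepB cur acc x = acc from by unfold nwStepB; rw [h]]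
      exact ih acc
    · rw [List.foldl_cons, List.foldl_cons,
        show nwStepB cur acc x = nwSelB acc _ from by unfold nwStepB; rw [h]]
      exact ih _

lemma nwAltEq (cur : Int) (ws : List Int) :
    nearestWasher_alt cur ws = ((PySem.List.enumerate ws).foldl (nwStepB cur) none).map (·.2) := by
  have key : (PySem.List.sorted2 ((PySem.List.enumerate ws).filterMap (nwCandB cur))
      (fun c => c.1) (fun c => c.2)).head? = (PySem.List.enumerate ws).foldl (nwStepB cur) none := by
    rw [nwSortedHead]
    rw [show PySem.List.min2? ((PySem.List.enumerate ws).filterMap (nwCandB cur))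
        (fun c => c.1) (fun c => c.2) = PySem.List.min2?
        ((PySem.List.enumerate ws).filterMap (nwCandB cur)) (·.1) (·.2) from rfl]
    rw [nwMin2Eq, nwMinFold]
  unfold nearestWasher_alt
  show (match PySem.List.sorted2 ((PySem.List.enumerate ws).filterMap (nwCandB cur))
      (fun c => c.1) (fun c => c.2) with
    | m :: _ => some m.2
    | [] => none) = ((PySem.List.enumerate ws).foldl (nwStepB cur) none).map (fun x => x.2)
  rw [← key]
  cases PySem.List.sorted2 ((PySem.List.enumerate ws).filterMap (nwCandB cur))
      (fun c => c.1) (fun c => c.2) <;> rfl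

def nwRelPN (cur s : Int) (st : Option Int × Option Int) (acc : Option (Int × Int)) : Prop :=
  (st = (none, none) ∧ acc = none) ∨
  ∃ i v, st = (some i, some v) ∧ acc = some (|v - cur|, i) ∧ i < s ∧
    ((0 < cur ∧ v < cur) ∨ (cur < 0 ∧ cur < v))

lemma nwStepPN (cur : Int) (hcur : cur ≠ 0) (s x : Int) (st : Option Int × Option Int)
    (acc : Option (Int × Int)) (h : nwRelPN cur s st acc) :
    nwRelPN cur (s + 1) (nearestWasherStepA cur st (s, x)) (nwStepB cur acc (s, x)) := by
  rcases lt_or_gt_of_ne hcur with hc | hc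
  · -- cur < 0
    rcases h with ⟨hst, hacc⟩ | ⟨i, v, hst, hacc, his, hsign⟩
    · subst hst; subst hacc
      by_cases hx : cur < x
      · simp [nearestWasherStepA, nwStepB, nwCandB, hc, hc.not_gt, hx]
        exact Or.inr ⟨s, x, rfl, rfl, by omega, Or.inr ⟨hc, hx⟩⟩
      · simp [nearestWasherStepA, nwStepB, nwCandB, hc, hc.not_gt, hx]
        exact Or.inl ⟨rfl, rfl⟩
    · subst hst; subst hacc
      have hv : cur < v := by rcases hsign with ⟨h1, _⟩ | ⟨_, h2⟩ <;> omega
      have ev : |v - cur| = v - cur := by rw [abs_of_pos]; omega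
      by_cases hx : cur < x
      · have ex : |x - cur| = x - cur := by rw [abs_of_pos]; omega
        by_cases hxv : x < v
        · simp [nearestWasherStepA, nwStepB, nwCandB, nwSelB, hc, hc.not_gt, hx, hxv, ex, ev]
          refine Or.inr ⟨s, x, by simp, by rw [ex], by omega, Or.inr ⟨hc, hx⟩⟩
        · simp [nearestWasherStepA, nwStepB, nwCandB, nwSelB, hc, hc.not_gt, hx, hxv, ex, ev]
          refine Or.inr ⟨i, v, by simp, by rw [if_neg (by omega), ev], by omega, Or.inr ⟨hc, hv⟩⟩
      · simp [nearestWasherStepA, nwStepB, nwCandB, hc, hc.not_gt, hx]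
        exact Or.inr ⟨i, v, rfl, by rw [ev], by omega, Or.inr ⟨hc, hv⟩⟩
  · -- 0 < cur
    rcases h with ⟨hst, hacc⟩ | ⟨i, v, hst, hacc, his, hsign⟩
    · subst hst; subst hacc
      by_cases hx : x < cur
      · simp [nearestWasherStepA, nwStepB, nwCandB, hc, hx]
        exact Or.inr ⟨s, x, rfl, rfl, by omega, Or.inl ⟨hc, hx⟩⟩
      · simp [nearestWasherStepA, nwStepB, nwCandB, hc, hx]
        exact Or.inl ⟨rfl, rfl⟩
    · subst hst; subst hacc
      have hv : v < cur := by rcases hsign with ⟨_, h1⟩ | ⟨h2, _⟩ <;> omega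
      have ev : |v - cur| = cur - v := by rw [abs_of_neg]; omega; omega
      by_cases hx : x < cur
      · have ex : |x - cur| = cur - x := by rw [abs_of_neg]; omega; omega
        by_cases hvx : v < x
        · simp [nearestWasherStepA, nwStepB, nwCandB, nwSelB, hc, hx, hvx, ex, ev]
          refine Or.inr ⟨s, x, by simp, by rw [ex], by omega, Or.inl ⟨hc, hx⟩⟩
        · simp [nearestWasherStepA, nwStepB, nwCandB, nwSelB, hc, hx, hvx, ex, ev]
          refine Or.inr ⟨i, v, by simp, by rw [if_neg (by omega), ev], by omega, Or.inl ⟨hc, hv⟩⟩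
      · simp [nearestWasherStepA, nwStepB, nwCandB, hc, hx]
        exact Or.inr ⟨i, v, rfl, by rw [ev], by omega, Or.inl ⟨hc, hv⟩⟩

lemma nwFoldPN (cur : Int) (hcur : cur ≠ 0) (l : List Int) :
    ∀ (s : Int) (st : Option Int × Option Int) (acc : Option (Int × Int)), nwRelPN cur s st acc →
    nwRelPN cur (s + l.length) ((PySem.List.enumerate l s).foldl (nearestWasherStepA cur) st)
      ((PySem.List.enumerate l s).foldl (nwStepB cur) acc) := by
  induction l with
  | nil => intro s st acc h; simpa using h
  | cons x t ih =>
    intro s st acc h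
    rw [PySem.List.enumerate_cons, List.foldl_cons, List.foldl_cons]
    have h2 := ih (s + 1) _ _ (nwStepPN cur hcur s x st acc h)
    have he : s + 1 + (t.length : Int) = s + ((x :: t).length : Int) := by
      simp [List.length_cons]; ring
    rwa [he] at h2

def nwRel0 (pre : List Int) (st : Option Int × Option Int) (acc : Option (Int × Int)) : Prop :=
  (st = (none, none) ∧ acc = none ∧ pre = []) ∨
  ∃ (n : Nat) (v : Int), st = (some (n : Int), some v) ∧ acc = some (|v|, (n : Int)) ∧
    n < pre.length ∧ pre.getD n 0 = v ∧
    (∀ j < n, |v| < |pre.getD j 0|) ∧ (∀ j, n ≤ j → j < pre.length → |v| ≤ |pre.getD j 0|)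

lemma nwStep0 (ws : List Int) (hD : ¬ D_nearestWasher 0 ws) (pre : List Int) (x : Int)
    (l : List Int) (hws : ws = pre ++ x :: l) (st : Option Int × Option Int)
    (acc : Option (Int × Int)) (h : nwRel0 pre st acc) :
    nwRel0 (pre ++ [x]) (nearestWasherStepA 0 st ((pre.length : Int), x))
      (nwStepB 0 acc ((pre.length : Int), x)) := by
  rcases h with ⟨hst, hacc, hpre⟩ | ⟨n, v, hst, hacc, hn, hv, hlt, hle⟩
  · subst hst; subst hacc; subst hpre
    simp [nearestWasherStepA, nwStepB, nwCandB, nwSelB]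
    exact Or.inr ⟨0, x, by simp, by simp, by simp, by simp, by omega,
      by intro j h1 h2; have hj0 : j = 0 := by simp at h2; omega
         subst hj0; simp⟩
  · subst hst; subst hacc
    by_cases hxv : |x| < v
    · -- A updates; B updates too since |x| < |v| (v must be ≥ 0 here)
      have hv0 : 0 ≤ v := le_trans (abs_nonneg x) (le_of_lt hxv)
      have hxabs : |x| < |v| := by rwa [abs_of_nonneg hv0]
      simp [nearestWasherStepA, nwStepB, nwCandB, nwSelB, hxv, hxabs]
      refine Or.inr ⟨pre.length, x, by simp, by simp, by simp, ?_, ?_, ?_⟩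
      · rw [List.getD_append_right _ _ _ _ (le_refl _)]; simp
      · intro j hj
        rw [List.getD_append _ _ _ _ hj]
        rcases lt_or_ge j n with hjn | hjn
        · exact lt_trans hxabs (hlt j hjn)
        · exact lt_of_lt_of_le hxabs (hle j hjn hj)
      · intro j h1 h2
        have : j = pre.length := by simp at h2; omega
        subst this
        rw [List.getD_append_right _ _ _ _ (le_refl _)]; simp
    · -- A keeps; B keeps too: |x| < |v| would either contradict hxv (v ≥ 0) or realise D_ (v < 0)
      have hBno : ¬ (|x| < |v|) := by
        intro habs
        by_cases hv0 : 0 ≤ v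
        · rw [abs_of_nonneg hv0] at habs
          exact hxv habs
        · rw [not_le] at hv0
          apply hD
          refine ⟨rfl, n, ?_, ?_, ?_, x, ?_, ?_⟩
          · simp [hws]; omega
          · rw [hws, List.getD_append _ _ _ _ hn, hv]; omega
          · intro y hy
            rw [hws, List.getD_append _ _ _ _ hn, hv]
            rw [hws, List.take_append_of_le_length (by omega), List.mem_take_iff_getElem] at hy
            obtain ⟨j, hj, hyeq⟩ := hy
            rw [← hyeq, ← List.getD_eq_getElem _ 0 (by omega)]
            exact hlt j (by omega)
          · rw [hws, List.drop_append_of_le_length (by omega)]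
            simp
          · rw [hws, List.getD_append _ _ _ _ hn, hv]
            simpa using habs
      simp only [nearestWasherStepA, nwStepB, nwCandB, nwSelB]
      simp [hxv, hBno, show ¬ ((pre.length : Int) < (n : Int)) from by omega]
      refine Or.inr ⟨n, v, by simp, by simp, by simp; omega, ?_, ?_, ?_⟩
      · rw [List.getD_append _ _ _ _ hn]; exact hv
      · intro j hj
        rw [List.getD_append _ _ _ _ (by omega)]
        exact hlt j hj
      · intro j h1 h2
        simp at h2
        rcases lt_or_ge j pre.length with hjl | hjl
        · rw [List.getD_append _ _ _ _ hjl]; exact hle j h1 hjl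
        · have : j = pre.length := by omega
          subst this
          rw [List.getD_append_right _ _ _ _ (le_refl _)]
          simpa using not_lt.mp hBno

lemma nwFold0 (ws : List Int) (hD : ¬ D_nearestWasher 0 ws) (l : List Int) :
    ∀ (pre : List Int), ws = pre ++ l → ∀ (st : Option Int × Option Int) (acc : Option (Int × Int)),
    nwRel0 pre st acc →
    nwRel0 ws ((PySem.List.enumerate l (pre.length : Int)).foldl (nearestWasherStepA 0) st)
      ((PySem.List.enumerate l (pre.length : Int)).foldl (nwStepB 0) acc) := by
  induction l with
  | nil => intro pre hws st acc h; simp [hws]; simpa using h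
  | cons x t ih =>
    intro pre hws st acc h
    rw [PySem.List.enumerate_cons, List.foldl_cons, List.foldl_cons]
    have hstep := nwStep0 ws hD pre x t hws st acc h
    have h2 := ih (pre ++ [x]) (by simp [hws]) _ _ hstep
    have he : (((pre ++ [x]).length : Nat) : Int) = (pre.length : Int) + 1 := by
      simp
    rwa [he] at h2

theorem nw_spec_main (cur : Int) (ws : List Int) (hD : ¬ D_nearestWasher cur ws) :
    nearestWasher cur ws = nearestWasher_alt cur ws := by
  rw [nwAltEq]
  unfold nearestWasher
  rcases eq_or_ne cur 0 with rfl | hcur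
  · have h := nwFold0 ws hD ws [] rfl (none, none) none (Or.inl ⟨rfl, rfl, rfl⟩)
    rw [show PySem.List.enumerate ws = PySem.List.enumerate ws ((([] : List Int).length : Nat) : Int) from rfl]
    rcases h with ⟨h1, h2, _⟩ | ⟨n, v, h1, h2, _, _, _, _⟩ <;> rw [h1, h2] <;> rfl
  · have h := nwFoldPN cur hcur ws 0 (none, none) none (Or.inl ⟨rfl, rfl⟩)
    rcases h with ⟨h1, h2⟩ | ⟨i, v, h1, h2, _, _⟩ <;> rw [h1, h2] <;> rfl


-- ---- tightness: separate characterisations of A's and B's folds at cur = 0 ----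

-- negative strict prefix-minimum (in absolute value) at position j
def nwNSPM (l : List Int) (j : Nat) : Prop :=
  l.getD j 0 < 0 ∧ ∀ y ∈ l.take j, |l.getD j 0| < |y|

lemma nwNSPM_append (pre : List Int) (x : Int) (j : Nat) (hj : j < pre.length) :
    nwNSPM (pre ++ [x]) j ↔ nwNSPM pre j := by
  unfold nwNSPM
  rw [List.getD_append _ _ _ _ hj, List.take_append_of_le_length (by omega)]

def nwInvA (pre : List Int) (st : Option Int × Option Int) : Prop :=
  (st = (none, none) ∧ pre = []) ∨
  ∃ (n : Nat) (v : Int), st = (some (n : Int), some v) ∧ n < pre.length ∧ pre.getD n 0 = v ∧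
    (∀ j < n, |v| < |pre.getD j 0|) ∧
    (0 ≤ v → ∀ j < pre.length, |v| ≤ |pre.getD j 0| ∧ ¬ nwNSPM pre j) ∧
    (∀ j < pre.length, nwNSPM pre j → n ≤ j)

lemma nwStepInvA (pre : List Int) (x : Int) (st : Option Int × Option Int) (h : nwInvA pre st) :
    nwInvA (pre ++ [x]) (nearestWasherStepA 0 st ((pre.length : Int), x)) := by
  rcases h with ⟨hst, hpre⟩ | ⟨n, v, hst, hn, hv, hlt, hmin, hfirst⟩
  · subst hst; subst hpre
    simp [nearestWasherStepA]
    refine Or.inr ⟨0, x, by simp, by simp, by simp, by omega, ?_, ?_⟩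
    · intro hx0 j hj
      have hj0 : j = 0 := by simpa using hj
      subst hj0
      refine ⟨by simp, ?_⟩
      intro hN
      rcases hN with ⟨hneg, _⟩
      simp at hneg
      omega
    · intro j hj hN; omega
  · subst hst
    by_cases hxv : |x| < v
    · have hv0 : 0 ≤ v := le_trans (abs_nonneg x) (le_of_lt hxv)
      simp [nearestWasherStepA, hxv]
      refine Or.inr ⟨pre.length, x, by simp, by simp, ?_, ?_, ?_, ?_⟩
      · rw [List.getD_append_right _ _ _ _ (le_refl _)]; simp
      · intro j hj
        rw [List.getD_append _ _ _ _ hj]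
        calc |x| < v := hxv
          _ = |v| := (abs_of_nonneg hv0).symm
          _ ≤ |pre.getD j 0| := (hmin hv0 j hj).1
      · intro hx0 j hj
        simp at hj
        rcases lt_or_ge j pre.length with hjl | hjl
        · refine ⟨?_, ?_⟩
          · rw [List.getD_append _ _ _ _ hjl]
            calc |x| ≤ v := le_of_lt hxv
              _ = |v| := (abs_of_nonneg hv0).symm
              _ ≤ |pre.getD j 0| := (hmin hv0 j hjl).1
          · rw [nwNSPM_append _ _ _ hjl]
            exact (hmin hv0 j hjl).2
        · have hje : j = pre.length := by omega
          subst hje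
          refine ⟨by rw [List.getD_append_right _ _ _ _ (le_refl _)]; simp, ?_⟩
          intro hN
          rcases hN with ⟨hneg, _⟩
          rw [List.getD_append_right _ _ _ _ (le_refl _)] at hneg
          simp at hneg
          omega
      · intro j hj hN
        simp at hj
        rcases lt_or_ge j pre.length with hjl | hjl
        · rw [nwNSPM_append _ _ _ hjl] at hN
          exact absurd hN (hmin hv0 j hjl).2
        · omega
    · simp [nearestWasherStepA, hxv]
      refine Or.inr ⟨n, v, by simp, by simp; omega, ?_, ?_, ?_, ?_⟩
      · rw [List.getD_append _ _ _ _ hn]; exact hv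
      · intro j hj
        rw [List.getD_append _ _ _ _ (by omega)]
        exact hlt j hj
      · intro hv0 j hj
        simp at hj
        rcases lt_or_ge j pre.length with hjl | hjl
        · refine ⟨?_, ?_⟩
          · rw [List.getD_append _ _ _ _ hjl]
            exact (hmin hv0 j hjl).1
          · rw [nwNSPM_append _ _ _ hjl]
            exact (hmin hv0 j hjl).2
        · have hje : j = pre.length := by omega
          subst hje
          have hvx : v ≤ |x| := not_lt.mp hxv
          refine ⟨?_, ?_⟩
          · rw [List.getD_append_right _ _ _ _ (le_refl _)]
            simpa [abs_of_nonneg hv0] using hvx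
          · intro hN
            rcases hN with ⟨_, hall⟩
            have hvmem : v ∈ (pre ++ [x]).take pre.length := by
              rw [List.take_append_of_le_length (le_refl _), List.take_length]
              rw [← hv]
              rw [List.getD_eq_getElem _ _ hn]
              exact List.getElem_mem hn
            have := hall v hvmem
            rw [List.getD_append_right _ _ _ _ (le_refl _)] at this
            simp at this
            rw [abs_of_nonneg hv0] at this
            omega
      · intro j hj hN
        simp at hj
        rcases lt_or_ge j pre.length with hjl | hjl
        · rw [nwNSPM_append _ _ _ hjl] at hN
          exact hfirst j hjl hN
        · omega

lemma nwFoldInvA (l : List Int) :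
    ∀ (pre : List Int) (st : Option Int × Option Int), nwInvA pre st →
    nwInvA (pre ++ l) ((PySem.List.enumerate l (pre.length : Int)).foldl (nearestWasherStepA 0) st) := by
  induction l with
  | nil => intro pre st h; simpa using h
  | cons x t ih =>
    intro pre st h
    rw [PySem.List.enumerate_cons, List.foldl_cons]
    have h2 := ih (pre ++ [x]) _ (nwStepInvA pre x st h)
    have he : (((pre ++ [x]).length : Nat) : Int) = (pre.length : Int) + 1 := by simp
    rw [he] at h2
    simpa using h2

def nwInvB (pre : List Int) (acc : Option (Int × Int)) : Prop :=
  (acc = none ∧ pre = []) ∨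
  ∃ (m : Nat) (a : Int), acc = some (a, (m : Int)) ∧ m < pre.length ∧ a = |pre.getD m 0| ∧
    ∀ j < pre.length, a ≤ |pre.getD j 0|

lemma nwStepInvB (pre : List Int) (x : Int) (acc : Option (Int × Int)) (h : nwInvB pre acc) :
    nwInvB (pre ++ [x]) (nwStepB 0 acc ((pre.length : Int), x)) := by
  rcases h with ⟨hacc, hpre⟩ | ⟨m, a, hacc, hm, ha, hmin⟩
  · subst hacc; subst hpre
    simp [nwStepB, nwCandB, nwSelB]
    refine Or.inr ⟨0, |x|, by simp, by simp, by simp, ?_⟩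
    intro j hj
    have hj0 : j = 0 := by simpa using hj
    subst hj0
    simp
  · subst hacc
    by_cases hxm : |x| < a
    · simp [nwStepB, nwCandB, nwSelB, hxm]
      refine Or.inr ⟨pre.length, |x|, by simp, by simp, ?_, ?_⟩
      · rw [List.getD_append_right _ _ _ _ (le_refl _)]; simp
      · intro j hj
        simp at hj
        rcases lt_or_ge j pre.length with hjl | hjl
        · rw [List.getD_append _ _ _ _ hjl]
          exact le_of_lt (lt_of_lt_of_le hxm (hmin j hjl))
        · have : j = pre.length := by omega
          subst this
          rw [List.getD_append_right _ _ _ _ (le_refl _)]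
          simp
    · simp [nwStepB, nwCandB, nwSelB, hxm, show ¬ ((pre.length : Int) < (m : Int)) from by omega]
      refine Or.inr ⟨m, a, by simp, by simp; omega, ?_, ?_⟩
      · rw [List.getD_append _ _ _ _ hm]; exact ha
      · intro j hj
        simp at hj
        rcases lt_or_ge j pre.length with hjl | hjl
        · rw [List.getD_append _ _ _ _ hjl]
          exact hmin j hjl
        · have : j = pre.length := by omega
          subst this
          rw [List.getD_append_right _ _ _ _ (le_refl _)]
          simpa using not_lt.mp hxm

lemma nwFoldInvB (l : List Int) :
    ∀ (pre : List Int) (acc : Option (Int × Int)), nwInvB pre acc →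
    nwInvB (pre ++ l) ((PySem.List.enumerate l (pre.length : Int)).foldl (nwStepB 0) acc) := by
  induction l with
  | nil => intro pre acc h; simpa using h
  | cons x t ih =>
    intro pre acc h
    rw [PySem.List.enumerate_cons, List.foldl_cons]
    have h2 := ih (pre ++ [x]) _ (nwStepInvB pre x acc h)
    have he : (((pre ++ [x]).length : Nat) : Int) = (pre.length : Int) + 1 := by simp
    rw [he] at h2
    simpa using h2

theorem nw_tight_main (ws : List Int) (hD : D_nearestWasher 0 ws) :
    nearestWasher 0 ws ≠ nearestWasher_alt 0 ws := by
  obtain ⟨-, i, hi, hneg, hpref, y, hy, hlty⟩ := hD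
  rw [nwAltEq]
  unfold nearestWasher
  rw [show PySem.List.enumerate ws = PySem.List.enumerate ws ((([] : List Int).length : Nat) : Int) from rfl]
  have hA := nwFoldInvA ws [] (none, none) (Or.inl ⟨rfl, rfl⟩)
  have hB := nwFoldInvB ws [] none (Or.inl ⟨rfl, rfl⟩)
  simp only [List.nil_append] at hA hB
  rcases hA with ⟨-, hnil⟩ | ⟨n, v, h1, hnlen, hvdef, hstrict, hminA, hfirst⟩
  · rw [hnil] at hi; simp at hi
  rcases hB with ⟨-, hnil⟩ | ⟨m, aB, g1, gm, gaB, gmin⟩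
  · rw [hnil] at hi; simp at hi
  rw [h1, g1]
  simp only [Option.map_some]
  intro hEq
  have hnm : n = m := by
    have : (n : Int) = (m : Int) := by simpa using hEq
    exact_mod_cast this
  subst hnm
  have hvneg : v < 0 := by
    by_contra hge
    rw [not_lt] at hge
    exact (hminA hge i hi).2 ⟨hneg, hpref⟩
  have hni : n ≤ i := hfirst i hi ⟨hneg, hpref⟩
  obtain ⟨k, hk, hyk⟩ := List.mem_iff_getElem.mp (List.mem_of_mem_drop hy)
  have h1y : |ws.getD n 0| ≤ |y| := by
    have hh := gmin k hk
    rw [List.getD_eq_getElem _ _ hk, hyk] at hh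
    rwa [gaB] at hh
  have h3 : |ws.getD i 0| ≤ |v| := by
    rcases lt_or_eq_of_le hni with hlt' | heq
    · refine le_of_lt (hpref v ?_)
      rw [← hvdef, List.getD_eq_getElem _ _ hnlen, List.mem_take_iff_getElem]
      exact ⟨n, by omega, rfl⟩
    · rw [← hvdef, heq]
  rw [hvdef] at h1y
  have := lt_of_le_of_lt h1y hlty
  omega

-- ===== VERDICT (by name: the statement is the Claim_ definition above) =====
theorem nearestWasher_spec : Claim_unchanged_nearestWasher := by
  intro cur washers _ hD
  exact nw_spec_main cur washers hD
theorem nearestWasher_changed : Claim_changed_nearestWasher := by unfold Claim_changed_nearestWasher; decide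
theorem nearestWasher_tight : Claim_exact_nearestWasher := by
  intro cur washers _ hD
  have hc : cur = 0 := hD.1
  subst hc
  exact nw_tight_main washers hD
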